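-- pv_equiv track=rewrite | github.com/jsbyun121/MultiPL-E | preprocess_json.py | remove_code_from_bottom
-- ===== SOURCE A (Python) =====
-- def prefix_comments():
--     """Define comment start patterns for different languages."""
--     return {
--         'ml': ['(*', '*'],
--         'jl': ['"""'],
--         'lua': ['--'],
--         'r': ['#'],
--         'rkt': [';;'],
--         'clj': [';'],
--         'coq': ['(*'],
--         'cpp': ['//', '/*'],
--         'cs': ['//', '/*'],
--         'py': ['#', '"""', "'''"],
--     }
--
-- def postfix_comments():
--     """Define comment end patterns for different languages."""
--     return {
--         'ml': ['*)'],
--         'jl': ['"""'],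
--         'lua': [],
--         'r': [],
--         'rkt': [],
--         'clj': [],
--         'coq': ['*)'],
--         'cpp': ['*/'],
--         'cs': ['*/'],
--         'py': ['"""', "'''"],
--     }
--
-- def remove_code_from_bottom(prompt: str, language: str) -> str:
--     """
--     Search from bottom up. Keep everything until we find a comment line.
--     """
--     lines = prompt.split('\n')
--     if not lines:
--         return ""
--
--     if prefix_comments().get(language, []):
--         start_patterns = prefix_comments()[language]
--     else:
--         start_patterns = ['"""', "'''"]
--
--     if postfix_comments().get(language, []):
--         end_patterns = postfix_comments()[language]
--     else:
--         end_patterns = ['"""', "'''"]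
--
--     # Search from bottom up
--     for i in range(len(lines) - 1, -1, -1):
--         line = lines[i]
--         stripped = line.strip()
--
--         # Skip empty lines
--         if not stripped:
--             continue
--
--         # Check if this line is a comment
--         for start_pattern in start_patterns:
--             if stripped.startswith(start_pattern):
--                 # Found comment - keep everything up to and including this line
--                 return '\n'.join(lines[:i + 1])
--
--             else:
--                 for end_pattern in end_patterns:
--                     if stripped.endswith(end_pattern):
--                         # Found comment - keep everything up to and including this line
--                         return '\n'.join(lines[:i + 1])
--
--     # No comments found, return original
--     return '\n'.join(lines)
-- ===== SOURCE B (Python) =====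
-- def remove_code_from_bottom(prompt: str, language: str) -> str:
--     """
--     Single top-down pass: remember the index of the last non-empty line that
--     looks like a comment, then truncate after it.
--     """
--     lines = prompt.split('\n')
--
--     start_patterns = prefix_comments().get(language) or ['"""', "'''"]
--     end_patterns = postfix_comments().get(language) or ['"""', "'''"]
--
--     last_comment = None
--     for i, line in enumerate(lines):
--         stripped = line.strip()
--         if stripped and (any(stripped.startswith(p) for p in start_patterns)
--                          or any(stripped.endswith(p) for p in end_patterns)):
--             last_comment = i
--
--     if last_comment is not None:
--         return '\n'.join(lines[:last_comment + 1])
--     return '\n'.join(lines)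
--
--
-- def prefix_comments():
--     return {
--         'ml': ['(*', '*'],
--         'jl': ['"""'],
--         'lua': ['--'],
--         'r': ['#'],
--         'rkt': [';;'],
--         'clj': [';'],
--         'coq': ['(*'],
--         'cpp': ['//', '/*'],
--         'cs': ['//', '/*'],
--         'py': ['#', '"""', "'''"],
--     }
--
--
-- def postfix_comments():
--     return {
--         'ml': ['*)'],
--         'jl': ['"""'],
--         'lua': [],
--         'r': [],
--         'rkt': [],
--         'clj': [],
--         'coq': ['*)'],
--         'cpp': ['*/'],
--         'cs': ['*/'],
--         'py': ['"""', "'''"],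
--     }
-- ===== Notes on version B (the rewrite author's own statement) =====
-- stated objective: alternative
-- what changed: Replaces A's bottom-up search with an early-return inside doubly nested pattern loops by a single top-down pass that records the index of the last comment-looking line and truncates once at the end.
import Mathlib
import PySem

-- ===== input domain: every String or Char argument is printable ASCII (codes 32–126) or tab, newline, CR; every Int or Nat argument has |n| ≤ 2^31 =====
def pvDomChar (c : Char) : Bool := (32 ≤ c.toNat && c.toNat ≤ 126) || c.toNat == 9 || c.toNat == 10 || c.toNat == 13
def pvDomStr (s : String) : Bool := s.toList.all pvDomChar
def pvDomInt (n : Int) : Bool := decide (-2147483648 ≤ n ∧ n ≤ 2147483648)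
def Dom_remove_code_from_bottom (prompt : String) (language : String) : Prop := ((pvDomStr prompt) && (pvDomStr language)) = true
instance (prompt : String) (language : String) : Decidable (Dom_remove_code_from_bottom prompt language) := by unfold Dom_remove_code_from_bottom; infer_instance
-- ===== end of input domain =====

-- B replaces A's bottom-up search (early return from doubly nested pattern loops) by one
-- top-down pass recording the last comment-line index; same return value, similar cost ("alternative").

-- ===== PORT A =====
-- prefix_comments() / postfix_comments(): module-level constant dicts, shared by both ports
def pvPrefixComments : PySem.Dict String (List String) :=
  PySem.Dict.ofList [("ml", ["(*", "*"]), ("jl", ["\"\"\""]), ("lua", ["--"]), ("r", ["#"]),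
    ("rkt", [";;"]), ("clj", [";"]), ("coq", ["(*"]), ("cpp", ["//", "/*"]),
    ("cs", ["//", "/*"]), ("py", ["#", "\"\"\"", "'''"])]

def pvPostfixComments : PySem.Dict String (List String) :=
  PySem.Dict.ofList [("ml", ["*)"]), ("jl", ["\"\"\""]), ("lua", []), ("r", []),
    ("rkt", []), ("clj", []), ("coq", ["*)"]), ("cpp", ["*/"]), ("cs", ["*/"]),
    ("py", ["\"\"\"", "'''"])]

-- A's nested comment test: 'for start_pattern: if startswith: return … else: for end_pattern:
-- if endswith: return …'; the early returns all return the same value, so it is a Bool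
def pvIsCommentA (starts ends : List String) (stripped : String) : Bool :=
  starts.any (fun sp =>
    if PySem.Str.startswith stripped sp then true
    else ends.any (fun ep => PySem.Str.endswith stripped ep))

-- A's 'for i in range(len(lines)-1, -1, -1)' with early return: first index (top of the list)
-- whose line is a non-empty comment line.  Indices produced by pyRange are always in range,
-- so pyGetD's default "" is never used.
def pvSearchA (lines starts ends : List String) : List Int → Option Int
  | [] => none
  | i :: rest =>
    let stripped := PySem.Str.strip (PySem.List.pyGetD lines i "")
    if stripped = "" then pvSearchA lines starts ends rest
    else if pvIsCommentA starts ends stripped then some i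
    else pvSearchA lines starts ends rest

def remove_code_from_bottom (prompt : String) (language : String) : String :=
  -- prompt.split('\n'); the separator is non-empty, so split? never returns none
  let lines := (PySem.Str.split? prompt "\n").getD []
  if lines = [] then ""
  else
    let starts := if (pvPrefixComments.get? language).getD [] ≠ [] then
        (pvPrefixComments.get? language).getD [] else ["\"\"\"", "'''"]
    let ends := if (pvPostfixComments.get? language).getD [] ≠ [] then
        (pvPostfixComments.get? language).getD [] else ["\"\"\"", "'''"]
    match pvSearchA lines starts ends
        (PySem.List.pyRange ((lines.length : Int) - 1) (-1) (-1)) with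
    | some i => PySem.Str.join "\n" (PySem.List.slice lines none (some (i + 1)))
    | none => PySem.Str.join "\n" lines

-- ===== PORT B =====
-- B's flat comment test: any(startswith) or any(endswith)
def pvIsCommentB (starts ends : List String) (stripped : String) : Bool :=
  starts.any (fun p => PySem.Str.startswith stripped p)
    || ends.any (fun p => PySem.Str.endswith stripped p)

-- B's single forward pass: 'for i, line in enumerate(lines): … last_comment = i'
def pvLastComment (starts ends : List String) : List String → Nat → Option Nat → Option Nat
  | [], _, acc => acc
  | l :: rest, i, acc =>
    let stripped := PySem.Str.strip l
    if stripped ≠ "" && pvIsCommentB starts ends stripped then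
      pvLastComment starts ends rest (i + 1) (some i)
    else
      pvLastComment starts ends rest (i + 1) acc

def remove_code_from_bottom_alt (prompt : String) (language : String) : String :=
  let lines := (PySem.Str.split? prompt "\n").getD []
  -- 'prefix_comments().get(language) or default'
  let starts := match pvPrefixComments.get? language with
    | some v => if v = [] then ["\"\"\"", "'''"] else v
    | none => ["\"\"\"", "'''"]
  let ends := match pvPostfixComments.get? language with
    | some v => if v = [] then ["\"\"\"", "'''"] else v
    | none => ["\"\"\"", "'''"]
  match pvLastComment starts ends lines 0 none with
  | some j => PySem.Str.join "\n" (lines.take (j + 1))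
  | none => PySem.Str.join "\n" lines

-- ===== PRECONDITION & SPEC =====
def Spec_remove_code_from_bottom (prompt : String) (language : String) (out : String) : Prop := out = remove_code_from_bottom_alt prompt language
instance (prompt : String) (language : String) (out : String) : Decidable (Spec_remove_code_from_bottom prompt language out) := by unfold Spec_remove_code_from_bottom; infer_instance

-- ===== CLAIM (what is proved, stated in full; the proofs are below) =====
def Claim_equal_remove_code_from_bottom : Prop := ∀ (prompt : String) (language : String), Dom_remove_code_from_bottom prompt language → Spec_remove_code_from_bottom prompt language (remove_code_from_bottom prompt language)

-- ===== LEMMAS AND PROOFS =====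

-- reference: index of the LAST element of xs satisfying p (counted from the front)
def pvLastIdx (p : String → Bool) : List String → Option Nat
  | [] => none
  | x :: rest =>
    match pvLastIdx p rest with
    | some j => some (j + 1)
    | none => if p x then some 0 else none

-- the line predicate both ports decide (B's flat form)
def pvQ (starts ends : List String) (s : String) : Bool :=
  PySem.Str.strip s ≠ "" && pvIsCommentB starts ends (PySem.Str.strip s)

theorem pvIsCommentA_eq (starts ends : List String) (h : starts ≠ []) (t : String) :
    pvIsCommentA starts ends t = pvIsCommentB starts ends t := by
  induction starts with
  | nil => exact absurd rfl h
  | cons p ps ih =>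
    rcases Decidable.em (ps = []) with hps | hps
    · subst hps
      simp only [pvIsCommentA, pvIsCommentB, List.any_cons, List.any_nil]
      cases PySem.Str.startswith t p <;>
        cases ends.any (fun ep => PySem.Str.endswith t ep) <;> simp
    · have := ih hps
      simp only [pvIsCommentA, pvIsCommentB, List.any_cons] at this ⊢
      rw [this]
      cases PySem.Str.startswith t p <;>
        cases ps.any (fun sp => PySem.Str.startswith t sp) <;>
        cases ends.any (fun ep => PySem.Str.endswith t ep) <;> simp

theorem pvLastIdx_snoc (p : String → Bool) (ys : List String) (x : String) :
    pvLastIdx p (ys ++ [x]) = if p x then some ys.length else pvLastIdx p ys := by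
  induction ys with
  | nil => simp [pvLastIdx]
  | cons y ys ih =>
    simp only [List.cons_append, pvLastIdx, ih]
    cases hx : p x
    · simp
    · simp

theorem pvLastComment_spec (starts ends : List String) (xs : List String)
    (i : Nat) (acc : Option Nat) :
    pvLastComment starts ends xs i acc =
      match pvLastIdx (pvQ starts ends) xs with
      | some j => some (i + j)
      | none => acc := by
  induction xs generalizing i acc with
  | nil => simp [pvLastComment, pvLastIdx]
  | cons x rest ih =>
    simp only [pvLastComment, pvLastIdx]
    cases hx : pvQ starts ends x
    · have hx' : (PySem.Str.strip x ≠ "" && pvIsCommentB starts ends (PySem.Str.strip x)) = false := hx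
      simp only [hx', if_false, Bool.false_eq_true, ih]
      cases pvLastIdx (pvQ starts ends) rest <;> simp [Nat.add_assoc, Nat.add_comm 1]
    · have hx' : (PySem.Str.strip x ≠ "" && pvIsCommentB starts ends (PySem.Str.strip x)) = true := hx
      simp only [hx', if_true, ih]
      cases pvLastIdx (pvQ starts ends) rest <;> simp [Nat.add_assoc, Nat.add_comm 1]

theorem pvSearchA_spec (lines starts ends : List String) (hst : starts ≠ [])
    (n : Nat) (hn : n ≤ lines.length) :
    pvSearchA lines starts ends (PySem.List.pyRange ((n : Int) - 1) (-1) (-1)) =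
      (match pvLastIdx (pvQ starts ends) (lines.take n) with
        | some j => some ((j : Int))
        | none => none) := by
  induction n with
  | zero =>
    rw [PySem.List.pyRange_neg_one_eq_nil (by norm_num)]
    simp [pvSearchA, pvLastIdx]
  | succ n ih =>
    have hn' : n ≤ lines.length := Nat.le_of_succ_le hn
    have hlt : n < lines.length := hn
    have hcons : PySem.List.pyRange ((↑(n + 1) : Int) - 1) (-1) (-1) =
        (n : Int) :: PySem.List.pyRange ((n : Int) - 1) (-1) (-1) := by
      have : ((↑(n + 1) : Int) - 1) = (n : Int) := by push_cast; ring
      rw [this, PySem.List.pyRange_neg_one_cons (by omega)]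
    rw [hcons]
    have hget : PySem.List.pyGetD lines (n : Int) "" = lines[n] := by
      rw [PySem.List.pyGetD_natCast]
      simp [List.getD, List.getElem?_eq_getElem hlt]
    have htake : lines.take (n + 1) = lines.take n ++ [lines[n]] :=
      List.take_succ_eq_append_getElem hlt
    have hlen : (lines.take n).length = n := by simp [Nat.min_eq_left hn']
    rw [htake, pvLastIdx_snoc, hlen]
    simp only [pvSearchA, hget]
    by_cases hempty : PySem.Str.strip lines[n] = ""
    · have hq : pvQ starts ends lines[n] = false := by simp [pvQ, hempty]
      rw [hq, if_pos hempty, ih hn']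
      simp
    · rw [if_neg hempty]
      rw [pvIsCommentA_eq starts ends hst]
      by_cases hc : pvIsCommentB starts ends (PySem.Str.strip lines[n]) = true
      · have hq : pvQ starts ends lines[n] = true := by simp [pvQ, hempty, hc]
        rw [hq, if_pos hc]
        simp
      · have hc' : pvIsCommentB starts ends (PySem.Str.strip lines[n]) = false := by
          simpa using hc
        have hq : pvQ starts ends lines[n] = false := by simp [pvQ, hc']
        rw [hq, if_neg hc, ih hn']
        simp

theorem pvStarts_eq (language : String) :
    (if (pvPrefixComments.get? language).getD [] ≠ [] then
        (pvPrefixComments.get? language).getD [] else ["\"\"\"", "'''"]) =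
      (match pvPrefixComments.get? language with
        | some v => if v = [] then ["\"\"\"", "'''"] else v
        | none => ["\"\"\"", "'''"]) := by
  cases h : pvPrefixComments.get? language with
  | none => simp
  | some v =>
    by_cases hv : v = [] <;> simp [hv]

theorem pvEnds_eq (language : String) :
    (if (pvPostfixComments.get? language).getD [] ≠ [] then
        (pvPostfixComments.get? language).getD [] else ["\"\"\"", "'''"]) =
      (match pvPostfixComments.get? language with
        | some v => if v = [] then ["\"\"\"", "'''"] else v
        | none => ["\"\"\"", "'''"]) := by
  cases h : pvPostfixComments.get? language with
  | none => simp
  | some v =>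
    by_cases hv : v = [] <;> simp [hv]

-- the selected start-pattern list is never empty (the guard tests exactly that)
theorem pvStarts_ne_nil (language : String) :
    (if (pvPrefixComments.get? language).getD [] ≠ [] then
        (pvPrefixComments.get? language).getD [] else ["\"\"\"", "'''"]) ≠ [] := by
  by_cases h : (pvPrefixComments.get? language).getD [] = [] <;> simp [h]

-- the common core: A's bottom-up scan equals B's forward pass, for any lines and any
-- non-empty start-pattern list
theorem pvCore (lines starts ends : List String) (hst : starts ≠ []) :
    (if lines = [] then ""
     else
       match pvSearchA lines starts ends
           (PySem.List.pyRange ((lines.length : Int) - 1) (-1) (-1)) with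
       | some i => PySem.Str.join "\n" (PySem.List.slice lines none (some (i + 1)))
       | none => PySem.Str.join "\n" lines) =
    (match pvLastComment starts ends lines 0 none with
      | some j => PySem.Str.join "\n" (lines.take (j + 1))
      | none => PySem.Str.join "\n" lines) := by
  by_cases hnil : lines = []
  · subst hnil
    have hje : PySem.Str.join "\n" ([] : List String) = "" := by decide
    simp [pvLastComment, hje]
  · rw [if_neg hnil]
    rw [pvSearchA_spec lines starts ends hst lines.length (le_refl _),
      pvLastComment_spec]
    simp only [List.take_length]
    cases hL : pvLastIdx (pvQ starts ends) lines with
    | none => simp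
    | some j =>
      have hj : ((j : Int) + 1) = ((j + 1 : Nat) : Int) := by push_cast; ring
      simp only [Nat.zero_add, hj,
        PySem.List.slice_to lines (by positivity : (0 : Int) ≤ ((j + 1 : Nat) : Int))]
      simp

-- ===== VERDICT (by name: the statement is the Claim_ definition above) =====
theorem remove_code_from_bottom_spec : Claim_equal_remove_code_from_bottom := by
  intro prompt language _
  unfold Spec_remove_code_from_bottom remove_code_from_bottom remove_code_from_bottom_alt
  rw [← pvStarts_eq, ← pvEnds_eq]
  exact pvCore ((PySem.Str.split? prompt "\n").getD [])
    (if (pvPrefixComments.get? language).getD [] ≠ [] then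
        (pvPrefixComments.get? language).getD [] else ["\"\"\"", "'''"])
    (if (pvPostfixComments.get? language).getD [] ≠ [] then
        (pvPostfixComments.get? language).getD [] else ["\"\"\"", "'''"])
    (pvStarts_ne_nil language)
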